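-- pv_equiv track=rewrite | github.com/ml-evs/matador | matador/scrapers/castep_scrapers.py | _castep_find_final_structure
-- ===== SOURCE A (Python) =====
-- def _castep_find_final_structure(flines):
--     """Search for info on final structure in .castep file.
--
--     Parameters:
--         flines (list): list of lines in file.
--
--     Returns:
--         int: line number in file where total energy of final structure is printed.
--
--     """
--     optimised = False
--     finish_line = 0
--     success_string = "Geometry optimization completed successfully"
--     failure_string = "Geometry optimization failed to converge after"
--     annoying_string = "WARNING - there is nothing to optimise - skipping relaxation"
--     # look for final "success/failure" string in file for geometry optimisation
--     for line_no, line in enumerate(reversed(flines)):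
--         if success_string in line:
--             finish_line = len(flines) - line_no
--             optimised = True
--             break
--         if annoying_string in line:
--             finish_line = len(flines) - line_no
--             optimised = True
--             break
--         if failure_string in line:
--             finish_line = len(flines) - line_no
--             optimised = False
--             break
--
--     # now wind back to get final total energies and non-symmetrised forces
--     for count, line in enumerate(reversed(flines[:finish_line])):
--         if "Final energy, E" in line or "Final energy =" in line:
--             finish_line -= count + 2
--             break
--
--     return finish_line, optimised
-- ===== SOURCE B (Python) =====
-- def _castep_find_final_structure(flines):
--     """Forward-scanning re-implementation: remember the LAST marker/energy line
--     in single forward passes instead of reverse scans with break."""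
--     success_string = "Geometry optimization completed successfully"
--     failure_string = "Geometry optimization failed to converge after"
--     annoying_string = "WARNING - there is nothing to optimise - skipping relaxation"
--     last = None
--     optimised = False
--     for idx, line in enumerate(flines):
--         if success_string in line or annoying_string in line:
--             last, optimised = idx, True
--         elif failure_string in line:
--             last, optimised = idx, False
--     finish_line = 0 if last is None else last + 1
--     energy = None
--     for idx, line in enumerate(flines[:finish_line]):
--         if "Final energy, E" in line or "Final energy =" in line:
--             energy = idx
--     if energy is not None:
--         finish_line = energy - 1
--     return finish_line, optimised
-- ===== Notes on version B (the rewrite author's own statement) =====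
-- stated objective: alternative
-- what changed: Both reverse scans with break and len-based back-arithmetic are replaced by forward passes that remember the last matching index (last marker -> finish_line = idx+1, last energy line -> finish_line = idx-1), with no reversed() and no reverse index arithmetic.
import Mathlib
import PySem

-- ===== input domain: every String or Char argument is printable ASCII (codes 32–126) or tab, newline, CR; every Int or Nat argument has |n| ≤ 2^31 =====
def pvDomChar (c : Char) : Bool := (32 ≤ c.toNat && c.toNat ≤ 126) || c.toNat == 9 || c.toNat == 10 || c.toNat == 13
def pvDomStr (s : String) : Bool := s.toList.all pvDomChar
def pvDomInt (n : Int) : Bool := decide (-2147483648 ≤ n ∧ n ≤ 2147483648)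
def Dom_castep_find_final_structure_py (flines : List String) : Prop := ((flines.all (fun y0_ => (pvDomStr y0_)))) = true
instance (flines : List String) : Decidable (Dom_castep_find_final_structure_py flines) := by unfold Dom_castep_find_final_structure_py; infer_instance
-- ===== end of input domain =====

-- B replaces A's two reverse scans (break on first hit, len-based arithmetic) by forward passes
-- remembering the last matching index; alternative decomposition, same O(n) cost.

-- ===== PORT A =====
def pvSucc : String := "Geometry optimization completed successfully"
def pvFail : String := "Geometry optimization failed to converge after"
def pvAnnoy : String := "WARNING - there is nothing to optimise - skipping relaxation"
def pvE1 : String := "Final energy, E"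
def pvE2 : String := "Final energy ="

-- for line_no, line in enumerate(reversed(flines)): … break
def pvALoop1 (n : Int) : List String → Int → Int × Bool
  | [], _ => (0, false)
  | line :: rest, i =>
      if PySem.Str.isIn pvSucc line then (n - i, true)
      else if PySem.Str.isIn pvAnnoy line then (n - i, true)
      else if PySem.Str.isIn pvFail line then (n - i, false)
      else pvALoop1 n rest (i + 1)

-- for count, line in enumerate(reversed(flines[:finish_line])): … break
def pvALoop2 (fin : Int) : List String → Int → Int
  | [], _ => fin
  | line :: rest, c =>
      if PySem.Str.isIn pvE1 line || PySem.Str.isIn pvE2 line then fin - (c + 2)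
      else pvALoop2 fin rest (c + 1)

def castep_find_final_structure_py (flines : List String) : Int × Bool :=
  let p := pvALoop1 (flines.length : Int) flines.reverse 0
  let finish_line := p.1
  let optimised := p.2
  let finish_line := pvALoop2 finish_line (PySem.List.slice flines none (some finish_line)).reverse 0
  (finish_line, optimised)

-- ===== PORT B =====
-- forward pass: remember last marker index and its flag
def pvBLoop1 : List String → Nat → Option Nat × Bool → Option Nat × Bool
  | [], _, st => st
  | line :: rest, i, st =>
      if PySem.Str.isIn pvSucc line || PySem.Str.isIn pvAnnoy line then
        pvBLoop1 rest (i + 1) (some i, true)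
      else if PySem.Str.isIn pvFail line then
        pvBLoop1 rest (i + 1) (some i, false)
      else pvBLoop1 rest (i + 1) st

-- forward pass: remember last energy-line index
def pvBLoop2 : List String → Nat → Option Nat → Option Nat
  | [], _, st => st
  | line :: rest, i, st =>
      if PySem.Str.isIn pvE1 line || PySem.Str.isIn pvE2 line then pvBLoop2 rest (i + 1) (some i)
      else pvBLoop2 rest (i + 1) st

def castep_find_final_structure_py_alt (flines : List String) : Int × Bool :=
  let st := pvBLoop1 flines 0 (none, false)
  let finish_line : Int := match st.1 with | none => 0 | some j => (j : Int) + 1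
  let energy := pvBLoop2 (PySem.List.slice flines none (some finish_line)) 0 none
  let finish_line := match energy with | none => finish_line | some j => (j : Int) - 1
  (finish_line, st.2)

-- ===== PRECONDITION & SPEC =====
def Spec_castep_find_final_structure_py (flines : List String) (out : Int × Bool) : Prop := out = castep_find_final_structure_py_alt flines
instance (flines : List String) (out : Int × Bool) : Decidable (Spec_castep_find_final_structure_py flines out) := by unfold Spec_castep_find_final_structure_py; infer_instance

-- ===== CLAIM (what is proved, stated in full; the proofs are below) =====
def Claim_equal_castep_find_final_structure_py : Prop := ∀ (flines : List String), Dom_castep_find_final_structure_py flines → Spec_castep_find_final_structure_py flines (castep_find_final_structure_py flines)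

-- ===== LEMMAS AND PROOFS =====

-- per-line classification shared by the proofs
def pvHit1 (line : String) : Option Bool :=
  if PySem.Str.isIn pvSucc line then some true
  else if PySem.Str.isIn pvAnnoy line then some true
  else if PySem.Str.isIn pvFail line then some false
  else none

def pvHit2 (line : String) : Option Bool :=
  if PySem.Str.isIn pvE1 line || PySem.Str.isIn pvE2 line then some true else none

theorem pvHit1_eq (x : String) :
    pvHit1 x =
      (if PySem.Str.isIn pvSucc x || PySem.Str.isIn pvAnnoy x then some true
       else if PySem.Str.isIn pvFail x then some false else none) := by
  simp [pvHit1]; split_ifs <;> simp_all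

-- first hit with its distance from the head
def pvFH (f : String → Option Bool) : List String → Option (Nat × Bool)
  | [] => none
  | x :: xs =>
      match f x with
      | some b => some (0, b)
      | none => (pvFH f xs).map (fun p => (p.1 + 1, p.2))

-- last hit with its forward index
def pvLH (f : String → Option Bool) : List String → Option (Nat × Bool)
  | [] => none
  | x :: xs =>
      match pvLH f xs with
      | some p => some (p.1 + 1, p.2)
      | none => (f x).map (fun b => (0, b))

theorem pvLH_lt (f : String → Option Bool) (l : List String) (p : Nat × Bool)
    (h : pvLH f l = some p) : p.1 < l.length := by
  induction l generalizing p with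
  | nil => simp [pvLH] at h
  | cons x xs ih =>
    simp only [pvLH] at h
    cases hx : pvLH f xs with
    | some q =>
      rw [hx] at h
      injection h with h'
      have := ih q hx
      subst h'
      simp [List.length_cons]; omega
    | none =>
      rw [hx] at h
      cases hfx : f x with
      | none => rw [hfx] at h; simp at h
      | some b =>
        rw [hfx] at h
        injection h with h'
        subst h'
        simp

theorem pvFH_append (f : String → Option Bool) (ys zs : List String) :
    pvFH f (ys ++ zs) =
      match pvFH f ys with
      | some p => some p
      | none => (pvFH f zs).map (fun p => (p.1 + ys.length, p.2)) := by
  induction ys with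
  | nil => cases h : pvFH f zs <;> simp [pvFH, h]
  | cons y ys ih =>
    cases h : f y with
    | some b => simp [pvFH, h]
    | none =>
      simp only [List.cons_append, pvFH, h, ih]
      cases hy : pvFH f ys with
      | some p => simp
      | none =>
        cases hz : pvFH f zs with
        | none => simp
        | some p => simp [List.length_cons]; omega

theorem pvFH_reverse (f : String → Option Bool) (l : List String) :
    pvFH f l.reverse =
      match pvLH f l with
      | none => none
      | some p => some (l.length - 1 - p.1, p.2) := by
  induction l with
  | nil => simp [pvFH, pvLH]
  | cons x xs ih =>
    rw [List.reverse_cons, pvFH_append, ih]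
    cases hx : pvLH f xs with
    | some p =>
      have hlt := pvLH_lt f xs p hx
      simp only [pvLH, hx, List.length_cons]
      have : xs.length - 1 - p.1 = xs.length + 1 - 1 - (p.1 + 1) := by omega
      rw [this]
    | none =>
      simp only [pvLH, hx]
      cases hfx : f x with
      | none => simp [pvFH, hfx]
      | some b => simp [pvFH, hfx, List.length_reverse]

theorem pvALoop1_eq (n : Int) (xs : List String) (i : Int) :
    pvALoop1 n xs i =
      match pvFH pvHit1 xs with
      | none => (0, false)
      | some p => (n - (i + p.1), p.2) := by
  induction xs generalizing i with
  | nil => simp [pvALoop1, pvFH]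
  | cons x xs ih =>
    simp only [pvALoop1, pvFH, pvHit1]
    split_ifs with h1 h2 h3 <;> simp_all
    cases pvFH pvHit1 xs with
    | none => simp
    | some p => simp; ring

theorem pvALoop2_eq (fin : Int) (xs : List String) (c : Int) :
    pvALoop2 fin xs c =
      match pvFH pvHit2 xs with
      | none => fin
      | some p => fin - (c + p.1 + 2) := by
  induction xs generalizing c with
  | nil => simp [pvALoop2, pvFH]
  | cons x xs ih =>
    simp only [pvALoop2, pvFH, pvHit2]
    split_ifs with h1 <;> simp_all
    cases pvFH pvHit2 xs with
    | none => simp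
    | some p => simp; ring

theorem pvBLoop1_eq (xs : List String) (i : Nat) (st : Option Nat × Bool) :
    pvBLoop1 xs i st =
      match pvLH pvHit1 xs with
      | none => st
      | some p => (some (i + p.1), p.2) := by
  induction xs generalizing i st with
  | nil => simp [pvBLoop1, pvLH]
  | cons x xs ih =>
    simp only [pvBLoop1, pvLH, pvHit1_eq]
    split_ifs with h1 h2 <;> rw [ih] <;>
      cases pvLH pvHit1 xs <;> simp <;> omega

theorem pvBLoop2_eq (xs : List String) (i : Nat) (st : Option Nat) :
    pvBLoop2 xs i st =
      match pvLH pvHit2 xs with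
      | none => st
      | some p => some (i + p.1) := by
  induction xs generalizing i st with
  | nil => simp [pvBLoop2, pvLH]
  | cons x xs ih =>
    simp only [pvBLoop2, pvLH, pvHit2]
    split_ifs with h1 <;> rw [ih] <;>
      cases pvLH pvHit2 xs <;> simp <;> omega

-- ===== VERDICT (by name: the statement is the Claim_ definition above) =====
theorem pvArith (p q : Nat) (h : q < p + 1) :
    (p : Int) + 1 - (0 + ((p + 1 - 1 - q : Nat) : Int) + 2) = (q : Int) - 1 := by omega

theorem castep_find_final_structure_py_spec : Claim_equal_castep_find_final_structure_py := by
  intro flines _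
  unfold Spec_castep_find_final_structure_py
  unfold castep_find_final_structure_py castep_find_final_structure_py_alt
  simp only [pvALoop1_eq, pvFH_reverse, pvBLoop1_eq, Nat.zero_add]
  cases h1 : pvLH pvHit1 flines with
  | none =>
    have hs : PySem.List.slice flines none (some (0 : Int)) = ([] : List String) := by
      rw [PySem.List.slice_to] <;> simp
    simp [hs, pvALoop2_eq, pvBLoop2_eq, pvFH, pvLH]
  | some p =>
    have hlt := pvLH_lt pvHit1 flines p h1
    have hfin : (flines.length : Int) - ((0 : Int) + ((flines.length - 1 - p.1 : Nat) : Int))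
        = (p.1 : Int) + 1 := by omega
    simp only [hfin]
    simp only [pvALoop2_eq, pvFH_reverse, pvBLoop2_eq]
    have hyslen : (PySem.List.slice flines none (some ((p.1 : Int) + 1))).length = p.1 + 1 := by
      rw [PySem.List.slice_to]
      · have ht : ((p.1 : Int) + 1).toNat = p.1 + 1 := by omega
        rw [ht]; simp [List.length_take]; omega
      · omega
    cases h2 : pvLH pvHit2 (PySem.List.slice flines none (some ((p.1 : Int) + 1))) with
    | none => simp
    | some q =>
      have hq := pvLH_lt pvHit2 _ q h2
      rw [hyslen] at hq
      simp only [hyslen, Nat.zero_add, Prod.mk.injEq]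
      exact ⟨pvArith p.1 q.1 hq, trivial⟩
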